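-- pv_equiv track=rewrite | github.com/avidLearnerInProgress/cf-octo-journey | 1111a.py | vowel_consonant
-- ===== SOURCE A (Python) =====
-- def vowel_consonant(x1, x2):
--     if x1 is None or x2 is None: return "No"
--     if len(x1) != len(x2): return "No"
--
--     vowels = ['a', 'e', 'i', 'o', 'u']
--
--     for i in range(len(x1)):
--         if x1[i] in vowels and x2[i] in vowels:
--             continue
--
--         elif x1[i] not in vowels and x2[i] not in vowels:
--             continue
--
--         else:
--             return "No"
--
--     return "Yes"
-- ===== SOURCE B (Python) =====
-- def vowel_consonant(x1, x2):
--     if x1 is None or x2 is None: return "No"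
--     if len(x1) != len(x2): return "No"
--     vowels = ['a', 'e', 'i', 'o', 'u']
--     p1 = {i for i, c in enumerate(x1) if c in vowels}
--     p2 = {i for i, c in enumerate(x2) if c in vowels}
--     return "Yes" if p1 == p2 else "No"
-- ===== Notes on version B (the rewrite author's own statement) =====
-- stated objective: alternative
-- what changed: Instead of comparing the two strings position by position, B builds for each string the SET of indices holding vowels and decides by set equality; correctness rests on the fact that, for equal-length strings, the vowel/consonant patterns agree iff their vowel-position sets coincide.
import Mathlib
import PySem

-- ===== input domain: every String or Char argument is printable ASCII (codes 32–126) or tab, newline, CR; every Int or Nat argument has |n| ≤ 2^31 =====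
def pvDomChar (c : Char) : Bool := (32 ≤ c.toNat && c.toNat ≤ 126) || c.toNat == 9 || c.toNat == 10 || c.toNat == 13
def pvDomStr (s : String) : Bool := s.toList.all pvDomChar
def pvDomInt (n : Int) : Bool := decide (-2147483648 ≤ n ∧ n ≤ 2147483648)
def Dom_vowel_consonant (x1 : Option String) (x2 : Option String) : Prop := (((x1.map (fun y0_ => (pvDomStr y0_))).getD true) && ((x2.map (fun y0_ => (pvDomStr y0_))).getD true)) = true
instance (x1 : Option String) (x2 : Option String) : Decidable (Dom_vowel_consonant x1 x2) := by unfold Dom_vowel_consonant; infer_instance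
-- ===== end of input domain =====

-- B decides by equality of vowel-position index SETS instead of A's positionwise loop; same values, alternative algorithm (not faster).

-- ===== PORT A =====
def pvVowels : List Char := ['a', 'e', 'i', 'o', 'u']

-- A's loop over i in range(len x1), ported as simultaneous structural recursion.
def vcLoopA : List Char → List Char → String
  | [], _ => "Yes"
  | _, [] => "Yes"
  | c1 :: t1, c2 :: t2 =>
    if pvVowels.contains c1 && pvVowels.contains c2 then vcLoopA t1 t2
    else if !(pvVowels.contains c1) && !(pvVowels.contains c2) then vcLoopA t1 t2
    else "No"

def vowel_consonant (x1 : Option String) (x2 : Option String) : String :=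
  match x1, x2 with
  | none, _ => "No"
  | _, none => "No"
  | some s1, some s2 =>
    if s1.toList.length ≠ s2.toList.length then "No"
    else vcLoopA s1.toList s2.toList

-- ===== PORT B =====
-- {i for i, c in enumerate(s) if c in vowels}
def vcIdxSet (s : String) : PySem.Set Int :=
  PySem.Set.ofList
    (((PySem.List.enumerate s.toList 0).filter (fun p => pvVowels.contains p.2)).map (·.1))

def vowel_consonant_alt (x1 : Option String) (x2 : Option String) : String :=
  match x1, x2 with
  | none, _ => "No"
  | _, none => "No"
  | some s1, some s2 =>
    if s1.toList.length ≠ s2.toList.length then "No"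
    else if PySem.Set.equal (vcIdxSet s1) (vcIdxSet s2) then "Yes" else "No"

-- ===== PRECONDITION & SPEC =====
def Spec_vowel_consonant (x1 : Option String) (x2 : Option String) (out : String) : Prop := out = vowel_consonant_alt x1 x2
instance (x1 : Option String) (x2 : Option String) (out : String) : Decidable (Spec_vowel_consonant x1 x2 out) := by unfold Spec_vowel_consonant; infer_instance

-- ===== CLAIM (what is proved, stated in full; the proofs are below) =====
def Claim_equal_vowel_consonant : Prop := ∀ (x1 : Option String) (x2 : Option String), Dom_vowel_consonant x1 x2 → Spec_vowel_consonant x1 x2 (vowel_consonant x1 x2)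

-- ===== LEMMAS AND PROOFS =====

-- the plain (un-deduplicated) index list B builds before taking the set
def vcIdx (s : Int) (l : List Char) : List Int :=
  ((PySem.List.enumerate l s).filter (fun p => pvVowels.contains p.2)).map (·.1)

lemma vcIdx_cons (s : Int) (c : Char) (t : List Char) :
    vcIdx s (c :: t) =
      if pvVowels.contains c then s :: vcIdx (s + 1) t else vcIdx (s + 1) t := by
  simp only [vcIdx, PySem.List.enumerate_cons, List.filter_cons]
  split_ifs with hv
  · simp
  · simp at hv; simp

lemma vcIdx_mem_lb (s : Int) (l : List Char) : ∀ x ∈ vcIdx s l, s ≤ x := by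
  intro x hx
  simp only [vcIdx, List.mem_map, List.mem_filter] at hx
  obtain ⟨p, ⟨hp, _⟩, rfl⟩ := hx
  rw [PySem.List.mem_enumerate_iff] at hp
  obtain ⟨k, hk, rfl⟩ := hp
  simp

lemma vcIdx_pairwise (s : Int) (l : List Char) : (vcIdx s l).Pairwise (· < ·) := by
  induction l generalizing s with
  | nil => simp [vcIdx, PySem.List.enumerate]
  | cons c t ih =>
    rw [vcIdx_cons]
    split_ifs
    · exact List.Pairwise.cons (fun x hx => by have := vcIdx_mem_lb (s+1) t x hx; omega) (ih _)
    · exact ih _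

lemma vcIdx_nodup (s : Int) (l : List Char) : (vcIdx s l).Nodup :=
  (vcIdx_pairwise s l).imp (fun h => ne_of_lt h)

-- A's loop answers "Yes"/"No" according to equality of the vowel-index lists (for equal lengths)
lemma vcLoopA_eq_idx (l1 l2 : List Char) (s : Int) (h : l1.length = l2.length) :
    vcLoopA l1 l2 = if vcIdx s l1 = vcIdx s l2 then "Yes" else "No" := by
  induction l1 generalizing l2 s with
  | nil =>
    cases l2 with
    | nil => simp [vcLoopA, vcIdx, PySem.List.enumerate]
    | cons c t => simp at h
  | cons c1 t1 ih =>
    cases l2 with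
    | nil => simp at h
    | cons c2 t2 =>
      simp only [List.length_cons, Nat.add_right_cancel_iff] at h
      have hlb1 := vcIdx_mem_lb (s+1) t1
      have hlb2 := vcIdx_mem_lb (s+1) t2
      by_cases h1 : pvVowels.contains c1 <;> by_cases h2 : pvVowels.contains c2 <;>
        simp only [vcLoopA, h1, h2, vcIdx_cons, if_pos, Bool.and_self,
          Bool.not_true, Bool.not_false, Bool.and_false, Bool.and_true,
          if_false, Bool.false_eq_true]
      · rw [ih t2 (s+1) h]; simp
      · -- c1 vowel, c2 not: A says "No"; index lists differ (s heads one, not the other)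
        rw [if_neg]
        intro heq
        have : s ∈ vcIdx (s+1) t2 := heq ▸ List.mem_cons_self
        have := hlb2 s this; omega
      · rw [if_neg]
        intro heq
        have : s ∈ vcIdx (s+1) t1 := heq.symm ▸ List.mem_cons_self
        have := hlb1 s this; omega
      · rw [ih t2 (s+1) h]

-- set equality of the deduplicated index sets agrees with list equality (both are strictly increasing)
lemma setEqual_vcIdx (l1 l2 : List Char) :
    PySem.Set.equal (PySem.Set.ofList (vcIdx 0 l1)) (PySem.Set.ofList (vcIdx 0 l2)) =
      decide (vcIdx 0 l1 = vcIdx 0 l2) := by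
  rw [show PySem.Set.ofList (vcIdx 0 l1) = vcIdx 0 l1 from
        PySem.Set.ofList_eq_self_of_nodup _ (vcIdx_nodup 0 l1),
      show PySem.Set.ofList (vcIdx 0 l2) = vcIdx 0 l2 from
        PySem.Set.ofList_eq_self_of_nodup _ (vcIdx_nodup 0 l2)]
  by_cases h : vcIdx 0 l1 = vcIdx 0 l2
  · simp [h, PySem.Set.equal_iff]
  · simp only [h, decide_false]
    rw [Bool.eq_false_iff]
    intro hc
    rw [PySem.Set.equal_iff] at hc
    have hperm : (vcIdx 0 l1).Perm (vcIdx 0 l2) :=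
      (List.perm_ext_iff_of_nodup (vcIdx_nodup 0 l1) (vcIdx_nodup 0 l2)).mpr hc
    exact h (hperm.eq_of_pairwise (fun a b _ _ hab hba => absurd hab (lt_asymm hba))
      (vcIdx_pairwise 0 l1) (vcIdx_pairwise 0 l2))

-- ===== VERDICT (by name: the statement is the Claim_ definition above) =====
theorem vowel_consonant_spec : Claim_equal_vowel_consonant := by
  unfold Claim_equal_vowel_consonant
  intro x1 x2 _
  unfold Spec_vowel_consonant vowel_consonant vowel_consonant_alt
  match x1, x2 with
  | none, _ => rfl
  | some s1, none => rfl
  | some s1, some s2 =>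
    show (if s1.toList.length ≠ s2.toList.length then "No" else vcLoopA s1.toList s2.toList) =
      (if s1.toList.length ≠ s2.toList.length then "No"
       else if PySem.Set.equal (vcIdxSet s1) (vcIdxSet s2) then "Yes" else "No")
    by_cases h : s1.toList.length = s2.toList.length
    · rw [if_neg (not_not_intro h), if_neg (not_not_intro h)]
      rw [vcLoopA_eq_idx s1.toList s2.toList 0 h]
      rw [show vcIdxSet s1 = PySem.Set.ofList (vcIdx 0 s1.toList) from rfl,
          show vcIdxSet s2 = PySem.Set.ofList (vcIdx 0 s2.toList) from rfl,
          setEqual_vcIdx]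
      by_cases he : vcIdx 0 s1.toList = vcIdx 0 s2.toList <;> simp [he]
    · rw [if_pos h, if_pos h]
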